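-- pv_equiv track=rewrite | github.com/Mohagames205/discord-proximity | test.py | check_relations
-- ===== SOURCE A (Python) =====
-- players =  {"Mohamed": 20, "Rik": 10, "Jan": 15, "John": 35, "Peter": 40, "Karel": 50, "Dieter": 60}
--
-- def distance(x1, x2):
--     return abs(x1 - x2)
--
-- def check_relations(name, blacklist=None, result=None):
--     """
--     Default arguments in Python are evaluated only once, when the function is defined.
--     When the function is subsequently called, the same objects are used as default arguments, rather than being re-created.
--     """
--     if blacklist == None or result == None:
--         blacklist = []
--         result = {}
--
--     position = players[name]
--     exclusion_list = players.copy()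
--
--     if name not in blacklist:
--         blacklist.append(name)
--
--     for user in blacklist:
--         exclusion_list.pop(user)
--
--     for player_name, coordinate in exclusion_list.items():
--         if distance(coordinate, position) <= 10:
--             result[player_name] = coordinate
--             check_relations(player_name, blacklist, result)
--
--     return result
-- ===== SOURCE B (Python) =====
-- players =  {"Mohamed": 20, "Rik": 10, "Jan": 15, "John": 35, "Peter": 40, "Karel": 50, "Dieter": 60}
--
--
-- def _neighbors(name, blacklist):
--     position = players[name]
--     return [p for p, c in players.items() if p not in blacklist and abs(c - position) <= 10]
--
--
-- def check_relations(name, blacklist=None, result=None):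
--     # Iterative depth-first search with an explicit stack instead of A's recursion.
--     # Mutates the passed-in blacklist/result like A does (same append/insert sequence).
--     if blacklist == None or result == None:
--         blacklist = []
--         result = {}
--
--     if name not in blacklist:
--         blacklist.append(name)
--
--     stack = _neighbors(name, blacklist)[::-1]
--     while stack:
--         player = stack.pop()
--         result[player] = players[player]
--         if player not in blacklist:
--             blacklist.append(player)
--         stack += _neighbors(player, blacklist)[::-1]
--
--     return result
-- ===== Notes on version B (the rewrite author's own statement) =====
-- stated objective: alternative
-- what changed: Replaces A's recursive flood-fill (recursion inside a for-loop over a popped-down dict copy) with an iterative depth-first search over an explicit stack: neighbours are pushed in reverse and each popped name is inserted and expanded at pop time, reproducing A's insertion order exactly.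
import Mathlib
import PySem

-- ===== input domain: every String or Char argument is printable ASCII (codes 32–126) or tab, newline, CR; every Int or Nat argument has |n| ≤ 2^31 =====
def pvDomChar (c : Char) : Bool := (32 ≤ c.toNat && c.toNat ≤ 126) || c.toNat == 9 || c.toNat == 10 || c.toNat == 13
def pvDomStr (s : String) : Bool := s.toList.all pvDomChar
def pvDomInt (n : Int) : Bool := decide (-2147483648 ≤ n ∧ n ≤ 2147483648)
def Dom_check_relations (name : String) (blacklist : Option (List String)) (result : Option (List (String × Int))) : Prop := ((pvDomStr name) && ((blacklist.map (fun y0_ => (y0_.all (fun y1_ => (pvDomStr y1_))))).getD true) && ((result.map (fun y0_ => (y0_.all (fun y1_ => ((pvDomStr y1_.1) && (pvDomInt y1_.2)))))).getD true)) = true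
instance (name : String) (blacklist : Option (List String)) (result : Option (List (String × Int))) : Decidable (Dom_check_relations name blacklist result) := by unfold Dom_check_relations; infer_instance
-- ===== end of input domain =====

-- B re-implements A's recursive flood-fill as an iterative depth-first search with an explicit
-- stack (same return value; both versions also mutate the caller's blacklist/result identically).

-- ===== PORT A =====
-- the module-level `players` dict
def playersD : PySem.Dict String Int :=
  PySem.Dict.mk [("Mohamed", 20), ("Rik", 10), ("Jan", 15), ("John", 35), ("Peter", 40), ("Karel", 50), ("Dieter", 60)]

def distance (x1 x2 : Int) : Int := |x1 - x2|

-- A's recursion, transliterated; `fuel` only bounds the recursion depth (Python has no such bound: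
-- the depth is in fact ≤ 2·|players|+2 ≤ 16 — proved below — so fuel 100 is never exhausted).
-- `players[name]` raises KeyError when absent: the `none` branch (excluded by Pre_) just returns.
-- `exclusion_list.pop(user)` is `erase` (equal where Python does not raise; raising inputs are outside Pre_).
def processA : Nat → String → List String → PySem.Dict String Int → List String × PySem.Dict String Int
  | 0, _, bl, res => (bl, res)
  | fuel + 1, name, bl, res =>
    match playersD.get? name with
    | none => (bl, res)
    | some position =>
      let bl1 := if name ∈ bl then bl else bl ++ [name]
      let exclusion := bl1.foldl (fun (d : PySem.Dict String Int) u => d.erase u) playersD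
      exclusion.items.foldl
        (fun st pc =>
          if distance pc.2 position ≤ 10 then
            let res1 := st.2.insert pc.1 pc.2
            processA fuel pc.1 st.1 res1
          else st)
        (bl1, res)

def check_relations (name : String) (blacklist : Option (List String)) (result : Option (List (String × Int))) : List (String × Int) :=
  match blacklist, result with
  | some bl, some res => (processA 100 name bl (PySem.Dict.ofList res)).2.items
  | _, _ => (processA 100 name [] (PySem.Dict.ofList [])).2.items

-- ===== PORT B =====
-- `_neighbors`: players within distance 10 that are not blacklisted, in dict order
def neighborsB (name : String) (bl : List String) : List String :=
  -- players[name] raises KeyError in Python when absent (excluded by Pre_); here that case is []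
  (playersD.get? name).elim []
    (fun position =>
      (playersD.items.filter (fun pc => decide (pc.1 ∉ bl) && decide (|pc.2 - position| ≤ 10))).map Prod.fst)

-- keys of `players` still outside `bl`, counted (only used by the termination measure)
def freeB (bl : List String) : Nat := playersD.keys.countP (fun q => decide (q ∉ bl))

-- termination measure for the while loop (the stack is modelled head = top: Python pushes the
-- reversed neighbour list and pops from the end, i.e. prepends and pops the head)
def bonusB : List String → List String → Nat
  | [], _ => 0
  | h :: _, bl => if h ∈ bl ∨ (playersD.get? h).isNone then 16 else 0

def measB (stack bl : List String) : Nat := 64 * freeB bl + stack.length + bonusB stack bl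

theorem bonusB_le (stack bl : List String) : bonusB stack bl ≤ 16 := by
  cases stack with
  | nil => simp [bonusB]
  | cons h t => rw [bonusB]; split <;> omega

theorem bonusB_cons (h : String) (t bl : List String) :
    bonusB (h :: t) bl = if h ∈ bl ∨ (playersD.get? h).isNone then 16 else 0 := rfl

theorem countP_lt_of {l : List String} {p q : String → Bool}
    (h : ∀ x ∈ l, q x = true → p x = true) {x0 : String} (hm : x0 ∈ l)
    (hq : q x0 = false) (hp : p x0 = true) : l.countP q < l.countP p := by
  have hperm := List.perm_cons_erase hm
  rw [hperm.countP_eq q, hperm.countP_eq p]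
  simp only [List.countP_cons, hq, hp, Bool.false_eq_true, if_false, if_true]
  have hmono : (l.erase x0).countP q ≤ (l.erase x0).countP p :=
    List.countP_mono_left (fun x hx => h x (List.mem_of_mem_erase hx))
  omega

theorem freeB_strict {bl bl2 : List String} {p : String}
    (hk : p ∈ playersD.keys) (hnb : p ∉ bl) (hb2 : p ∈ bl2)
    (hsub : ∀ x ∈ bl, x ∈ bl2) : freeB bl2 < freeB bl := by
  apply countP_lt_of (x0 := p) _ hk
  · simp [hb2]
  · simp [hnb]
  · intro x _ hx
    simp only [decide_eq_true_eq] at *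
    exact fun hxbl => hx (hsub x hxbl)

theorem players_items_isSome : ∀ pc ∈ playersD.items, (playersD.get? pc.1).isSome := by decide

theorem neighborsB_spec {q : String} {name : String} {bl : List String}
    (h : q ∈ neighborsB name bl) : q ∉ bl ∧ (playersD.get? q).isSome := by
  unfold neighborsB at h
  cases hg : playersD.get? name with
  | none => rw [hg] at h; simp [Option.elim] at h
  | some position =>
    rw [hg] at h
    simp only [Option.elim] at h
    obtain ⟨pc, hpc, rfl⟩ := List.mem_map.mp h
    have hmem := List.mem_of_mem_filter hpc
    have hfilt := List.of_mem_filter hpc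
    simp only [Bool.and_eq_true, decide_eq_true_eq] at hfilt
    exact ⟨hfilt.1, players_items_isSome _ hmem⟩

theorem neighborsB_len (name : String) (bl : List String) : (neighborsB name bl).length ≤ 7 := by
  unfold neighborsB
  cases playersD.get? name with
  | none => simp [Option.elim]
  | some position =>
    simp only [Option.elim]
    rw [List.length_map]
    calc (playersD.items.filter _).length ≤ playersD.items.length := List.length_filter_le _ _
      _ = 7 := by decide

-- the while loop of B (stack head = next pop, see measB's comment)
def loopB (stack bl : List String) (res : PySem.Dict String Int) : PySem.Dict String Int :=
  match stack with
  | [] => res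
  | p :: rest =>
    match hp : playersD.get? p with
    | none => loopB rest bl res  -- players[p] would raise; unreachable from check_relations_alt
    | some c =>
      let res1 := res.insert p c
      let bl1 := if p ∈ bl then bl else bl ++ [p]
      loopB (neighborsB p bl1 ++ rest) bl1 res1
termination_by measB stack bl
decreasing_by
  · -- popped name not a player (dead branch)
    unfold measB
    have h1 := bonusB_le rest bl
    have h2 : bonusB (p :: rest) bl = 16 := by rw [bonusB_cons, if_pos (Or.inr (by simp [hp]))]
    simp only [List.length_cons]
    omega
  · -- popped a player
    unfold measB
    by_cases hpb : p ∈ bl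
    · rw [dif_pos hpb]
      have hold : bonusB (p :: rest) bl = 16 := by rw [bonusB_cons, if_pos (Or.inl hpb)]
      have hns := neighborsB_len p bl
      cases hns2 : neighborsB p bl with
      | nil =>
        have h1 := bonusB_le rest bl
        simp only [List.nil_append, List.length_cons, hold]
        omega
      | cons q t =>
        have hq : q ∈ neighborsB p bl := by rw [hns2]; exact List.mem_cons_self ..
        obtain ⟨hq1, hq2⟩ := neighborsB_spec hq
        have hnew : bonusB (neighborsB p bl ++ rest) bl = 0 := by
          rw [hns2, List.cons_append, bonusB_cons, if_neg]
          push Not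
          exact ⟨hq1, by simpa [Option.isNone_iff_eq_none] using Option.isSome_iff_ne_none.mp hq2⟩
        rw [hns2] at hns
        simp only [hns2, List.cons_append, List.length_cons, List.length_append, hold] at *
        rw [hnew]
        simp at hns
        omega
    · rw [dif_neg hpb]
      have hk : p ∈ playersD.keys := by
        by_contra hnk
        rw [(PySem.Dict.get?_eq_none_iff_not_mem_keys _ _).mpr hnk] at hp
        simp at hp
      have hstrict : freeB (bl ++ [p]) < freeB bl :=
        freeB_strict hk hpb (by simp) (by intro x hx; simp [hx])
      have hns := neighborsB_len p (bl ++ [p])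
      have h1 := bonusB_le (neighborsB p (bl ++ [p]) ++ rest) (bl ++ [p])
      have hold : bonusB (p :: rest) bl = 0 := by
        rw [bonusB_cons, if_neg (by simp [hpb, hp])]
      simp only [List.length_append, List.length_cons, hold]
      omega

def check_relations_alt (name : String) (blacklist : Option (List String)) (result : Option (List (String × Int))) : List (String × Int) :=
  match blacklist with
  | some bl =>
    match result with
    | some res => runB name bl (PySem.Dict.ofList res)
    | none => runB name [] (PySem.Dict.ofList [])
  | none => runB name [] (PySem.Dict.ofList [])
where
  runB (name : String) (bl : List String) (res : PySem.Dict String Int) : List (String × Int) :=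
    let bl1 := if name ∈ bl then bl else bl ++ [name]
    (loopB (neighborsB name bl1) bl1 res).items

-- ===== PRECONDITION & SPEC =====
-- the player names, re-stated independently of the ports (Pre_/Raises_ may not share the ports' defs)
def playerNames : List String := ["Mohamed", "Rik", "Jan", "John", "Peter", "Karel", "Dieter"]

-- the blacklist that A's pop-loop runs over (empty when either optional argument is None)
def preBl (blacklist : Option (List String)) (result : Option (List (String × Int))) : List String :=
  if blacklist.isSome && result.isSome then blacklist.getD [] else []

-- Pre_ is exactly where Python A returns: `players[name]` must exist, and (when both optional
-- arguments are given) every blacklist entry must be a distinct player name, else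
-- `exclusion_list.pop(user)` raises KeyError.
def Pre_check_relations (name : String) (blacklist : Option (List String)) (result : Option (List (String × Int))) : Prop :=
  name ∈ playerNames ∧ (preBl blacklist result).Nodup ∧
    ∀ u ∈ preBl blacklist result, u ∈ playerNames
instance (name : String) (blacklist : Option (List String)) (result : Option (List (String × Int))) : Decidable (Pre_check_relations name blacklist result) := by unfold Pre_check_relations; infer_instance

def pvWitness_check_relations : String × Option (List String) × (Option (List (String × Int))) :=
  ("Mohamed", some ["Peter"], some [("Karel", 50)])

def Spec_check_relations (name : String) (blacklist : Option (List String)) (result : Option (List (String × Int))) (out : List (String × Int)) : Prop := out = check_relations_alt name blacklist result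
instance (name : String) (blacklist : Option (List String)) (result : Option (List (String × Int))) (out : List (String × Int)) : Decidable (Spec_check_relations name blacklist result out) := by unfold Spec_check_relations; infer_instance

-- ===== CLAIM (what is proved, stated in full; the proofs are below) =====
def Claim_equal_check_relations : Prop := ∀ (name : String) (blacklist : Option (List String)) (result : Option (List (String × Int))), Dom_check_relations name blacklist result → Pre_check_relations name blacklist result → Spec_check_relations name blacklist result (check_relations name blacklist result)


-- ===== LEMMAS AND PROOFS =====

theorem freeB_le (bl : List String) : freeB bl ≤ 7 := by
  have h := List.countP_le_length (l := playersD.keys) (p := fun q => decide (q ∉ bl))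
  have h7 : playersD.keys.length = 7 := rfl
  unfold freeB
  omega

theorem freeB_anti {bl bl2 : List String} (h : ∀ x ∈ bl, x ∈ bl2) : freeB bl2 ≤ freeB bl := by
  apply List.countP_mono_left
  intro x _ hx
  simp only [decide_eq_true_eq] at *
  exact fun hxbl => hx (h x hxbl)


-- the body of A's inner for-loop, named for the proofs (identical to the lambda in processA)
def stepA (fuel : Nat) (position : Int) (st : List String × PySem.Dict String Int) (pc : String × Int) : List String × PySem.Dict String Int :=
  if distance pc.2 position ≤ 10 then
    let res1 := st.2.insert pc.1 pc.2
    processA fuel pc.1 st.1 res1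
  else st

theorem processA_succ (fuel : Nat) (name : String) (bl : List String) (res : PySem.Dict String Int) :
    processA (fuel + 1) name bl res =
      match playersD.get? name with
      | none => (bl, res)
      | some position =>
        let bl1 := if name ∈ bl then bl else bl ++ [name]
        let exclusion := bl1.foldl (fun (d : PySem.Dict String Int) u => d.erase u) playersD
        exclusion.items.foldl (stepA fuel position) (bl1, res) := rfl

-- A's pop-loop over the copied dict is the membership filter
theorem erase_foldl_items (bl : List String) (d : PySem.Dict String Int) :
    (bl.foldl (fun (d : PySem.Dict String Int) u => d.erase u) d).items = d.items.filter (fun pc => decide (pc.1 ∉ bl)) := by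
  induction bl generalizing d with
  | nil => simp
  | cons u rest ih =>
    rw [List.foldl_cons, ih]
    show (d.items.filter (fun p => !(p.1 == u))).filter _ = _
    rw [List.filter_filter]
    apply List.filter_congr
    intro pc _
    by_cases h1 : pc.1 = u <;> by_cases h2 : pc.1 ∈ rest <;> simp [h1, h2]

-- the blacklist only grows through A's recursion
theorem processA_sub : ∀ (fuel : Nat) (name : String) (bl : List String) (res : PySem.Dict String Int)
    (x : String), x ∈ bl → x ∈ (processA fuel name bl res).1 := by
  intro fuel
  induction fuel with
  | zero => intro name bl res x hx; simpa [processA] using hx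
  | succ n ih =>
    have hgo : ∀ (pos : Int) (items : List (String × Int)) (st : List String × PySem.Dict String Int)
        (x : String), x ∈ st.1 → x ∈ (items.foldl (stepA n pos) st).1 := by
      intro pos items
      induction items with
      | nil => intro st x hx; simpa using hx
      | cons pc rest ihr =>
        intro st x hx
        rw [List.foldl_cons]
        apply ihr
        unfold stepA
        split
        · exact ih pc.1 st.1 _ x hx
        · exact hx
    intro name bl res x hx
    rw [processA_succ]
    cases playersD.get? name with
    | none => exact hx
    | some position =>
      apply hgo
      split <;> simp [hx]

theorem loopB_nil (bl : List String) (res : PySem.Dict String Int) : loopB [] bl res = res := by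
  rw [loopB]

theorem loopB_cons (p : String) (rest bl : List String) (res : PySem.Dict String Int)
    (c : Int) (hp : playersD.get? p = some c) :
    loopB (p :: rest) bl res =
      loopB (neighborsB p (if p ∈ bl then bl else bl ++ [p]) ++ rest)
        (if p ∈ bl then bl else bl ++ [p]) (res.insert p c) := by
  rw [loopB]
  split
  next heq => rw [hp] at heq; cases heq
  next c' heq => rw [hp] at heq; cases heq; rfl

-- neighborsB is A's snapshot: the distance filter over the pop-filtered dict
theorem neighborsB_eq (name : String) (position : Int) (bl1 : List String)
    (hg : playersD.get? name = some position) :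
    neighborsB name bl1 =
      (((bl1.foldl (fun (d : PySem.Dict String Int) u => d.erase u) playersD).items.filter
          (fun pc => decide (distance pc.2 position ≤ 10))).map Prod.fst) := by
  simp only [neighborsB, hg, Option.elim, erase_foldl_items, List.filter_filter]
  congr 1
  apply List.filter_congr
  intro pc _
  simp [distance, abs_sub_comm, Bool.and_comm]

theorem players_items_get : ∀ pc ∈ playersD.items, playersD.get? pc.1 = some pc.2 := by decide

theorem mem_keys_of_get? {x : String} {c : Int} (h : playersD.get? x = some c) :
    x ∈ playersD.keys := by
  by_contra hnk
  rw [(PySem.Dict.get?_eq_none_iff_not_mem_keys _ _).mpr hnk] at h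
  simp at h

-- the blacklist only grows through A's inner loop
theorem stepA_foldl_sub (f : Nat) (pos : Int) :
    ∀ (items : List (String × Int)) (st : List String × PySem.Dict String Int) (x : String),
      x ∈ st.1 → x ∈ (items.foldl (stepA f pos) st).1 := by
  intro items
  induction items with
  | nil => intro st x hx; simpa using hx
  | cons pc rest ihr =>
    intro st x hx
    rw [List.foldl_cons]
    apply ihr
    unfold stepA
    split
    · exact processA_sub f pc.1 st.1 _ x hx
    · exact hx

-- THE CENTRAL LEMMA: B's stack loop, run on the qualifying part of A's pending snapshot
-- followed by any continuation s, equals running the continuation from A's loop result.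
theorem mainL : ∀ (fuel : Nat) (pos : Int) (items : List (String × Int)) (s bl : List String)
    (res : PySem.Dict String Int),
    (∀ pc ∈ items, playersD.get? pc.1 = some pc.2) →
    2 * freeB bl + 2 + (if ∀ pc ∈ items, pc.1 ∉ bl then 0 else 1) ≤ fuel →
    loopB ((items.filter (fun pc => decide (distance pc.2 pos ≤ 10))).map Prod.fst ++ s) bl res
      = loopB s (items.foldl (stepA (fuel - 1) pos) (bl, res)).1
          (items.foldl (stepA (fuel - 1) pos) (bl, res)).2 := by
  intro fuel
  induction fuel with
  | zero =>
    intro pos items s bl res hsub hbound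
    exact absurd hbound (by omega)
  | succ n ihn =>
    intro pos items
    induction items with
    | nil =>
      intro s bl res hsub hbound
      simp
    | cons pc rest ihr =>
      intro s bl res hsub hbound
      obtain ⟨pn, c⟩ := pc
      have hget : playersD.get? pn = some c := hsub _ (List.mem_cons_self ..)
      simp only [Nat.add_sub_cancel] at *
      rw [List.foldl_cons]
      by_cases hd10 : distance c pos ≤ 10
      · -- within distance: A inserts and recurses; B pops pn next
        have hstep : stepA n pos (bl, res) (pn, c) = processA n pn bl (res.insert pn c) := by
          unfold stepA
          rw [if_pos hd10]
        obtain ⟨m, rfl⟩ : ∃ m, n = m + 1 := ⟨n - 1, by omega⟩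
        have hbl1 : ∃ bl1, bl1 = if pn ∈ bl then bl else bl ++ [pn] := ⟨_, rfl⟩
        obtain ⟨bl1, hbl1⟩ := hbl1
        have hproc : processA (m + 1) pn bl (res.insert pn c) =
            (((bl1.foldl (fun (d : PySem.Dict String Int) u => d.erase u) playersD).items).foldl (stepA m c)
              (bl1, res.insert pn c)) := by
          rw [processA_succ]
          simp only [hget, ← hbl1]
        have hE : ∀ pc ∈ (bl1.foldl (fun (d : PySem.Dict String Int) u => d.erase u) playersD).items,
            playersD.get? pc.1 = some pc.2 ∧ pc.1 ∉ bl1 := by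
          intro pc hpc
          rw [erase_foldl_items] at hpc
          refine ⟨players_items_get _ (List.mem_of_mem_filter hpc), ?_⟩
          have := List.of_mem_filter hpc
          simpa using this
        have hpn1 : pn ∈ bl1 := by
          rw [hbl1]; split <;> simp [*]
        have hblsub1 : ∀ x ∈ bl, x ∈ bl1 := by
          intro x hx; rw [hbl1]; split <;> simp [hx]
        have hboundE : 2 * freeB bl1 + 2 +
            (if ∀ pc ∈ (bl1.foldl (fun (d : PySem.Dict String Int) u => d.erase u) playersD).items, pc.1 ∉ bl1
             then 0 else 1) ≤ m + 1 := by
          rw [if_pos (fun pc hpc => (hE pc hpc).2)]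
          by_cases hpnbl : pn ∈ bl
          · have hbl1' : bl1 = bl := by rw [hbl1, if_pos hpnbl]
            have hbit : (if ∀ pc ∈ (pn, c) :: rest, pc.1 ∉ bl then 0 else 1) = 1 := by
              rw [if_neg]
              intro hall
              exact absurd hpnbl (hall _ (List.mem_cons_self ..))
            rw [hbit] at hbound
            rw [hbl1']
            omega
          · have hlt : freeB bl1 < freeB bl := by
              rw [hbl1, if_neg hpnbl]
              exact freeB_strict (mem_keys_of_get? hget) hpnbl (by simp)
                (by intro x hx; simp [hx])
            omega
        have IH1 := ihn c ((bl1.foldl (fun (d : PySem.Dict String Int) u => d.erase u) playersD).items)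
          ((rest.filter (fun pc => decide (distance pc.2 pos ≤ 10))).map Prod.fst ++ s)
          bl1 (res.insert pn c) (fun pc hpc => (hE pc hpc).1) hboundE
        simp only [Nat.add_sub_cancel] at IH1
        -- bookkeeping for the tail of the loop
        have hPR : ∀ x ∈ bl, x ∈ (processA (m + 1) pn bl (res.insert pn c)).1 :=
          fun x hx => processA_sub _ _ _ _ x hx
        have hPRpn : pn ∈ (processA (m + 1) pn bl (res.insert pn c)).1 := by
          rw [hproc]
          exact stepA_foldl_sub _ _ _ _ _ hpn1
        have hboundR : 2 * freeB (processA (m + 1) pn bl (res.insert pn c)).1 + 2 +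
            (if ∀ pc ∈ rest, pc.1 ∉ (processA (m + 1) pn bl (res.insert pn c)).1
             then 0 else 1) ≤ m + 1 + 1 := by
          have hfle : freeB (processA (m + 1) pn bl (res.insert pn c)).1 ≤ freeB bl :=
            freeB_anti hPR
          by_cases hbit : ∀ pc ∈ rest, pc.1 ∉ (processA (m + 1) pn bl (res.insert pn c)).1
          · rw [if_pos hbit]
            omega
          · rw [if_neg hbit]
            rw [not_forall] at hbit
            obtain ⟨pc0, hbit⟩ := hbit
            rw [not_forall] at hbit
            obtain ⟨hpc0r, hpc0in⟩ := hbit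
            rw [not_not] at hpc0in
            by_cases h0 : pc0.1 ∈ bl
            · have hbitI : (if ∀ pc ∈ (pn, c) :: rest, pc.1 ∉ bl then 0 else 1) = 1 := by
                rw [if_neg]
                intro hall
                exact absurd h0 (hall pc0 (List.mem_cons_of_mem _ hpc0r))
              rw [hbitI] at hbound
              omega
            · have hk0 : pc0.1 ∈ playersD.keys :=
                mem_keys_of_get? (hsub pc0 (List.mem_cons_of_mem _ hpc0r))
              have hlt : freeB (processA (m + 1) pn bl (res.insert pn c)).1 < freeB bl :=
                freeB_strict hk0 h0 hpc0in hPR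
              omega
        have IH2 := ihr s (processA (m + 1) pn bl (res.insert pn c)).1
          (processA (m + 1) pn bl (res.insert pn c)).2
          (fun pc hpc => hsub pc (List.mem_cons_of_mem _ hpc)) hboundR
        -- assemble
        rw [List.filter_cons, if_pos (by simpa using hd10), List.map_cons, List.cons_append,
          loopB_cons pn _ bl res c hget, ← hbl1, neighborsB_eq pn c bl1 hget, IH1, ← hproc,
          hstep]
        exact IH2
      · -- too far: both sides skip pc
        have hstep : stepA n pos (bl, res) (pn, c) = (bl, res) := by
          unfold stepA
          rw [if_neg hd10]
        have hble : (if ∀ pc ∈ rest, pc.1 ∉ bl then 0 else 1) ≤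
            (if ∀ pc ∈ (pn, c) :: rest, pc.1 ∉ bl then 0 else 1) := by
          by_cases h1 : ∀ pc ∈ rest, pc.1 ∉ bl
          · rw [if_pos h1]
            exact Nat.zero_le _
          · rw [if_neg h1, if_neg]
            intro hall
            exact h1 (fun pc hpc => hall pc (List.mem_cons_of_mem _ hpc))
        rw [List.filter_cons, if_neg (by simpa using hd10), hstep]
        exact ihr s bl res (fun pc hpc => hsub pc (List.mem_cons_of_mem _ hpc)) (by omega)

theorem get?_of_mem_playerNames {name : String} (h : name ∈ playerNames) :
    ∃ pos, playersD.get? name = some pos := by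
  fin_cases h <;> exact ⟨_, rfl⟩

-- both ports agree once the recursion/loop is entered
theorem run_eq (name : String) (bl0 : List String) (d0 : PySem.Dict String Int)
    (pos : Int) (hpos : playersD.get? name = some pos) :
    (processA 100 name bl0 d0).2.items = check_relations_alt.runB name bl0 d0 := by
  have hbl1 : ∃ bl1, bl1 = if name ∈ bl0 then bl0 else bl0 ++ [name] := ⟨_, rfl⟩
  obtain ⟨bl1, hbl1⟩ := hbl1
  have hproc : processA 100 name bl0 d0 =
      (((bl1.foldl (fun (d : PySem.Dict String Int) u => d.erase u) playersD).items).foldl (stepA 99 pos) (bl1, d0)) := by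
    rw [show (100 : Nat) = 99 + 1 from rfl, processA_succ]
    simp only [hpos, ← hbl1]
  have hE : ∀ pc ∈ (bl1.foldl (fun (d : PySem.Dict String Int) u => d.erase u) playersD).items, pc.1 ∉ bl1 := by
    intro pc hpc
    rw [erase_foldl_items] at hpc
    have := List.of_mem_filter hpc
    simpa using this
  have hsubE : ∀ pc ∈ (bl1.foldl (fun (d : PySem.Dict String Int) u => d.erase u) playersD).items,
      playersD.get? pc.1 = some pc.2 := by
    intro pc hpc
    rw [erase_foldl_items] at hpc
    exact players_items_get _ (List.mem_of_mem_filter hpc)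
  have hbound : 2 * freeB bl1 + 2 +
      (if ∀ pc ∈ (bl1.foldl (fun (d : PySem.Dict String Int) u => d.erase u) playersD).items, pc.1 ∉ bl1
       then 0 else 1) ≤ 100 := by
    rw [if_pos hE]
    have := freeB_le bl1
    omega
  have hmain := mainL 100 pos ((bl1.foldl (fun (d : PySem.Dict String Int) u => d.erase u) playersD).items) [] bl1 d0
    hsubE hbound
  rw [List.append_nil, loopB_nil] at hmain
  simp only [show (100 : Nat) - 1 = 99 from rfl] at hmain
  simp only [check_relations_alt.runB, ← hbl1]
  rw [neighborsB_eq name pos bl1 hpos, hmain, hproc]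

-- ===== VERDICT (by name: the statement is the Claim_ definition above) =====
theorem check_relations_spec : Claim_equal_check_relations := by
  unfold Claim_equal_check_relations Spec_check_relations
  intro name blacklist result hdom hpre
  obtain ⟨hname, hnd, hall⟩ := hpre
  obtain ⟨pos, hpos⟩ := get?_of_mem_playerNames hname
  cases blacklist <;> cases result <;>
    simp only [check_relations, check_relations_alt] <;>
    exact run_eq _ _ _ pos hpos
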